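-- pv_equiv track=rewrite | github.com/pypi-data/pypi-mirror-162 | packages/NlpToolkit-InformationRetrieval/NlpToolkit-InformationRetrieval-1.0.0.tar.gz/NlpToolkit-InformationRetrieval-1.0.0/InformationRetrieval/Document/Collection.py | selectIndexesWithMinimumTermIds
-- ===== SOURCE A (Python) =====
-- def selectIndexesWithMinimumTermIds(currentIdList: [int]) -> [int]:
--     result = []
--     _min = float('inf')
--     for _id in currentIdList:
--         if _id != -1 and _id < _min:
--             _min = _id
--     for i in range(len(currentIdList)):
--         if currentIdList[i] == _min:
--             result.append(i)
--     return result
-- ===== SOURCE B (Python) =====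
-- def selectIndexesWithMinimumTermIds(currentIdList: [int]) -> [int]:
--     result = []
--     _min = None
--     for i, _id in enumerate(currentIdList):
--         if _id == -1:
--             continue
--         if _min is None or _id < _min:
--             _min = _id
--             result = [i]
--         elif _id == _min:
--             result.append(i)
--     return result
-- ===== Notes on version B (the rewrite author's own statement) =====
-- stated objective: alternative
-- what changed: Replaces A's two sequential passes (compute the min, then rescan the whole list by index for matches) with one online pass that maintains the running minimum together with its index set, resetting the set when a smaller element appears.
import Mathlib
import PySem

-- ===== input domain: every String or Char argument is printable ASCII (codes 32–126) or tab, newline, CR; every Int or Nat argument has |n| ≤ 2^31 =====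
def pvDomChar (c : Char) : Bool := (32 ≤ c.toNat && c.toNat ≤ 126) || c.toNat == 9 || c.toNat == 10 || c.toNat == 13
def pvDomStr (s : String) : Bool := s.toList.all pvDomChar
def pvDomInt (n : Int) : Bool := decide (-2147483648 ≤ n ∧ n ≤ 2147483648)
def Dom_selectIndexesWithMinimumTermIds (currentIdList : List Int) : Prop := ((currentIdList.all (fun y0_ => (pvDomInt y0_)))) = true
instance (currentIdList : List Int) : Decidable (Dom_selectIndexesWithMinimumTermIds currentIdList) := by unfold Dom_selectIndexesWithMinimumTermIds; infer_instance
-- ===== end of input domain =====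

-- B fuses A's two passes (min, then rescan by index) into one online pass keeping the
-- running minimum together with its index set; same O(n) cost, different decomposition.

-- ===== PORT A =====
-- Python's `_min = float('inf')` is ported as `Option Int` with `none` = infinity:
-- `x < inf` is always true, and `currentIdList[i] == inf` is always false.
def aMinLoop : List Int → Option Int → Option Int
  | [], m => m
  | x :: xs, none => aMinLoop xs (if x ≠ -1 then some x else none)
  | x :: xs, some v => aMinLoop xs (if x ≠ -1 ∧ x < v then some x else some v)

-- the second Python loop: `for i in range(len(l)): if l[i] == _min: result.append(i)`
def aSecondLoop (l : List Int) (m : Option Int) : List Int :=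
  (PySem.List.pyRange 0 l.length 1).foldl
    (fun r i =>
      match m with
      | none => r      -- comparing an int with inf is always False
      | some v => if PySem.List.pyGetD l i 0 = v then r ++ [i] else r) []

def selectIndexesWithMinimumTermIds (currentIdList : List Int) : List Int :=
  aSecondLoop currentIdList (aMinLoop currentIdList none)

-- ===== PORT B =====
def bLoop : List Int → Int → Option Int → List Int → List Int
  | [], _, _, res => res
  | x :: xs, i, m, res =>
    if x = -1 then bLoop xs (i + 1) m res
    else
      match m with
      | none => bLoop xs (i + 1) (some x) [i]
      | some v =>
        if x < v then bLoop xs (i + 1) (some x) [i]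
        else if x = v then bLoop xs (i + 1) (some v) (res ++ [i])
        else bLoop xs (i + 1) (some v) res

def selectIndexesWithMinimumTermIds_alt (currentIdList : List Int) : List Int :=
  bLoop currentIdList 0 none []

-- ===== PRECONDITION & SPEC =====
def Spec_selectIndexesWithMinimumTermIds (currentIdList : List Int) (out : List Int) : Prop := out = selectIndexesWithMinimumTermIds_alt currentIdList
instance (currentIdList : List Int) (out : List Int) : Decidable (Spec_selectIndexesWithMinimumTermIds currentIdList out) := by unfold Spec_selectIndexesWithMinimumTermIds; infer_instance

-- ===== CLAIM (what is proved, stated in full; the proofs are below) =====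
def Claim_equal_selectIndexesWithMinimumTermIds : Prop := ∀ (currentIdList : List Int), Dom_selectIndexesWithMinimumTermIds currentIdList → Spec_selectIndexesWithMinimumTermIds currentIdList (selectIndexesWithMinimumTermIds currentIdList)

-- ===== LEMMAS AND PROOFS =====

-- canonical value: the indices (offset s) of elements of xs equal to M
def idxOfMin (M : Option Int) (xs : List Int) (s : Int) : List Int :=
  ((PySem.List.enumerate xs s).filter (fun p => decide (some p.2 = M))).map (·.1)

theorem idxOfMin_nil (M : Option Int) (s : Int) : idxOfMin M [] s = [] := by
  simp [idxOfMin, PySem.List.enumerate_nil]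

theorem idxOfMin_cons (M : Option Int) (x : Int) (xs : List Int) (s : Int) :
    idxOfMin M (x :: xs) s =
      (if some x = M then [s] else []) ++ idxOfMin M xs (s + 1) := by
  simp only [idxOfMin, PySem.List.enumerate_cons, List.filter_cons]
  by_cases h : some x = M <;> simp [h]

theorem aMinLoop_some (xs : List Int) : ∀ v : Int,
    ∃ w, aMinLoop xs (some v) = some w ∧ w ≤ v ∧ (w = v ∨ w ≠ -1) := by
  induction xs with
  | nil => intro v; exact ⟨v, rfl, le_refl v, Or.inl rfl⟩
  | cons x xs ih =>
    intro v
    simp only [aMinLoop]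
    by_cases h : x ≠ -1 ∧ x < v
    · rw [if_pos h]
      obtain ⟨w, hw, hle, hcase⟩ := ih x
      refine ⟨w, hw, le_trans hle (le_of_lt h.2), Or.inr ?_⟩
      rcases hcase with h1 | h1
      · rw [h1]; exact h.1
      · exact h1
    · rw [if_neg h]; exact ih v

theorem aMinLoop_ne_neg_one (xs : List Int) : ∀ (m : Option Int),
    (∀ v, m = some v → v ≠ -1) → ∀ w, aMinLoop xs m = some w → w ≠ -1 := by
  induction xs with
  | nil => intro m hm w hw; exact hm w hw
  | cons x xs ih =>
    intro m hm w hw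
    cases m with
    | none =>
      simp only [aMinLoop] at hw
      by_cases h : x ≠ -1
      · rw [if_pos h] at hw
        exact ih (some x) (by intro v hv; cases hv; exact h) w hw
      · rw [if_neg h] at hw
        exact ih none (by intro v hv; cases hv) w hw
    | some v =>
      have hv : v ≠ -1 := hm v rfl
      simp only [aMinLoop] at hw
      by_cases h : x ≠ -1 ∧ x < v
      · rw [if_pos h] at hw
        exact ih (some x) (by intro u hu; cases hu; exact h.1) w hw
      · rw [if_neg h] at hw
        exact ih (some v) (by intro u hu; cases hu; exact hv) w hw

-- A's second pass equals the canonical value (for any fixed minimum m)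
theorem aSecondLoop_eq (l : List Int) (m : Option Int) :
    aSecondLoop l m = idxOfMin m l 0 := by
  cases m with
  | none =>
    have : ∀ (acc : List Int) (r : List Int),
        r.foldl (fun (r : List Int) (_ : Int) => r) acc = acc := by
      intro acc r; induction r generalizing acc <;> simp_all [List.foldl]
    simp only [aSecondLoop, this]
    simp [idxOfMin]
  | some v =>
    unfold aSecondLoop
    have hrange : PySem.List.pyRange 0 (l.length : Int) 1 =
        (PySem.List.enumerate l 0).map (·.1) := by
      have := PySem.List.map_fst_enumerate (xs := l) (s := (0 : Int))
      simpa using this.symm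
    rw [hrange, List.foldl_map]
    have hcong : (PySem.List.enumerate l 0).foldl
        (fun (r : List Int) (p : Int × Int) =>
          if PySem.List.pyGetD l p.1 0 = v then r ++ [p.1] else r) [] =
        (PySem.List.enumerate l 0).foldl
        (fun (r : List Int) (p : Int × Int) =>
          if some p.2 = some v then r ++ [p.1] else r) [] := by
      apply PySem.List.foldl_congr_mem
      intro acc p hp
      rw [PySem.List.mem_enumerate_iff] at hp
      obtain ⟨k, hk, rfl⟩ := hp
      have hkk : PySem.List.pyGetD l ((0 : Int) + k) 0 = l[k] := by
        have h0 : ((0 : Int) + k) = (k : Int) := by omega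
        rw [h0, PySem.List.pyGetD_natCast, List.getD_eq_getElem l 0 hk]
      rw [hkk]
      simp
    rw [hcong, PySem.List.foldl_append_ite (p := fun p : Int × Int => some p.2 = some v) (f := fun p : Int × Int => p.1)]
    simp [idxOfMin]

-- B's loop invariant: given running minimum m over the processed prefix (with its
-- index list res), the result is the canonical value for the overall minimum.
theorem bLoop_eq (xs : List Int) : ∀ (i : Int) (m : Option Int) (res : List Int),
    (∀ v, m = some v → v ≠ -1) →
    bLoop xs i m res =
      (if aMinLoop xs m = m then res else []) ++ idxOfMin (aMinLoop xs m) xs i := by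
  induction xs with
  | nil => intro i m res _; simp [bLoop, aMinLoop, idxOfMin_nil]
  | cons x xs ih =>
    intro i m res hm
    by_cases hx : x = -1
    · -- skipped element; it can never equal the (non- -1) overall minimum
      subst hx
      have hMne : ¬ (some (-1 : Int) = aMinLoop xs m) := fun h =>
        aMinLoop_ne_neg_one xs m hm (-1) h.symm rfl
      cases m with
      | none =>
        simp only [bLoop, aMinLoop, if_neg (by simp : ¬ (-1 : Int) ≠ -1)]
        rw [ih (i + 1) none res (by intro v hv; cases hv), idxOfMin_cons, if_neg hMne]
        simp
      | some v =>
        simp only [bLoop, aMinLoop,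
          if_neg (by simp : ¬ ((-1 : Int) ≠ -1 ∧ (-1 : Int) < v))]
        rw [ih (i + 1) (some v) res hm, idxOfMin_cons, if_neg hMne]
        simp
    · cases m with
      | none =>
        simp only [bLoop, if_neg hx, aMinLoop, if_pos hx]
        rw [ih (i + 1) (some x) [i] (by intro v hv; cases hv; exact hx)]
        obtain ⟨w, hw, hle, hcase⟩ := aMinLoop_some xs x
        rw [hw, idxOfMin_cons]
        rw [if_neg (by simp : ¬ (some w = none))]
        by_cases hwx : w = x
        · subst hwx; simp
        · rw [if_neg (by intro h; cases h; exact hwx rfl),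
              if_neg (by intro h; cases h; exact hwx rfl)]
          simp
      | some v =>
        by_cases hlt : x < v
        · -- new strict minimum: reset
          simp only [bLoop, if_neg hx, if_pos hlt, aMinLoop, if_pos (⟨hx, hlt⟩ : x ≠ -1 ∧ x < v)]
          rw [ih (i + 1) (some x) [i] (by intro u hu; cases hu; exact hx)]
          obtain ⟨w, hw, hle, hcase⟩ := aMinLoop_some xs x
          rw [hw, idxOfMin_cons]
          rw [if_neg (by intro h; cases h; omega : ¬ (some w = some v))]
          by_cases hwx : w = x
          · subst hwx; simp
          · rw [if_neg (by intro h; cases h; exact hwx rfl),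
                if_neg (by intro h; cases h; exact hwx rfl)]
            simp
        · have hcond : ¬ (x ≠ -1 ∧ x < v) := by intro h; exact hlt h.2
          obtain ⟨w, hw, hle, hcase⟩ := aMinLoop_some xs v
          by_cases heq : x = v
          · -- equal to running minimum: append its index
            subst heq
            simp only [bLoop, if_neg hx, if_neg hlt, aMinLoop, if_neg hcond]
            rw [ih (i + 1) (some x) (res ++ [i]) hm]
            rw [hw, idxOfMin_cons]
            by_cases hwv : w = x
            · subst hwv; simp [List.append_assoc]
            · have h1 : ¬ ((some w : Option Int) = some x) := by simp [hwv]
              have h2 : ¬ ((some x : Option Int) = some w) := by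
                intro h; exact hwv (Option.some_inj.mp h).symm
              simp only [if_neg h1, if_neg h2]
              simp
          · -- larger than running minimum: ignore
            simp only [bLoop, if_neg hx, if_neg hlt, if_neg heq, aMinLoop, if_neg hcond]
            rw [ih (i + 1) (some v) res hm]
            rw [hw, idxOfMin_cons]
            rw [if_neg (by intro h; cases h; omega : ¬ (some x = some w))]
            simp

theorem A_eq (l : List Int) :
    selectIndexesWithMinimumTermIds l = idxOfMin (aMinLoop l none) l 0 := by
  unfold selectIndexesWithMinimumTermIds
  exact aSecondLoop_eq l (aMinLoop l none)

theorem B_eq (l : List Int) :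
    selectIndexesWithMinimumTermIds_alt l = idxOfMin (aMinLoop l none) l 0 := by
  unfold selectIndexesWithMinimumTermIds_alt
  rw [bLoop_eq l 0 none [] (by intro v hv; cases hv)]
  split <;> simp

-- ===== VERDICT (by name: the statement is the Claim_ definition above) =====
theorem selectIndexesWithMinimumTermIds_spec : Claim_equal_selectIndexesWithMinimumTermIds := by
  intro l _
  unfold Spec_selectIndexesWithMinimumTermIds
  rw [A_eq, B_eq]
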